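-- pv_equiv track=rewrite | github.com/GMainardi/Advent-2021 | 11/b.py | clean_mat
-- ===== SOURCE A (Python) =====
-- def clean_mat(mat):
--     f = 0
--     for x in range(len(mat)):
--         for y in range(len(mat[0])):
--             if mat[x][y] > 9:
--                 f += 1
--                 mat[x][y] = 0
--     return f == len(mat) * len(mat[0])
-- ===== SOURCE B (Python) =====
-- def clean_mat(mat):
--     # Two-pass decomposition: first decide whether every cell flashed,
--     # then reset the flashed cells in place (same mutation as the original).
--     w = len(mat[0])
--     flashed = all(mat[x][y] > 9 for x in range(len(mat)) for y in range(w))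
--     for x in range(len(mat)):
--         for y in range(w):
--             if mat[x][y] > 9:
--                 mat[x][y] = 0
--     return flashed
-- ===== Notes on version B (the rewrite author's own statement) =====
-- stated objective: simpler
-- what changed: Replaces the single count-mutate pass (count cells >9, compare count with rows*cols) with a direct all() check of the flash condition followed by a separate reset pass; mat is mutated identically.
import Mathlib
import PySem

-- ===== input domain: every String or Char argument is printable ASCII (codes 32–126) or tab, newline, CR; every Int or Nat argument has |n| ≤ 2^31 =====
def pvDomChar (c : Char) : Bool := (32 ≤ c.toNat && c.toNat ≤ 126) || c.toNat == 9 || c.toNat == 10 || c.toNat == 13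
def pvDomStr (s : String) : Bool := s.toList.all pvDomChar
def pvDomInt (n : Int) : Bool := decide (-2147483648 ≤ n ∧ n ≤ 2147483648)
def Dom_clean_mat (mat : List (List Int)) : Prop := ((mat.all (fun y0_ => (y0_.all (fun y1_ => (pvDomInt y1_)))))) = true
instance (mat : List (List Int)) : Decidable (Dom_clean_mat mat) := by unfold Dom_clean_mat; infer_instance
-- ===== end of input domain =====

-- B replaces A's single count-and-compare pass by an all()-check followed by a separate
-- reset pass (simpler decomposition); equivalence is about the RETURN value only — both
-- A and B zero exactly the same cells of mat in place.


-- ===== PORT A =====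
-- the loop body of 'for y in …: if mat[x][y] > 9: f += 1; mat[x][y] = 0' on state (f, mat)
def pvStepA (x : Int) (st : Int × List (List Int)) (y : Int) : Int × List (List Int) :=
  if PySem.List.pyGetD (PySem.List.pyGetD st.2 x []) y 0 > 9 then
    (st.1 + 1, PySem.List.pySetD st.2 x (PySem.List.pySetD (PySem.List.pyGetD st.2 x []) y 0))
  else st

def clean_mat (mat : List (List Int)) : Bool :=
  let res :=
    (PySem.List.pyRange 0 mat.length 1).foldl
      (fun (st : Int × List (List Int)) x =>
        (PySem.List.pyRange 0 ((PySem.List.pyGetD st.2 0 []).length : Int) 1).foldl (pvStepA x) st)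
      (0, mat)
  decide (res.1 = (res.2.length : Int) * ((PySem.List.pyGetD res.2 0 []).length : Int))

-- ===== PORT B =====
def clean_mat_alt (mat : List (List Int)) : Bool :=
  let w : Int := (PySem.List.pyGetD mat 0 []).length
  (PySem.List.pyRange 0 mat.length 1).all (fun x =>
    (PySem.List.pyRange 0 w 1).all (fun y =>
      decide (PySem.List.pyGetD (PySem.List.pyGetD mat x []) y 0 > 9)))
  -- Source B's second (reset) loop only mutates mat and does not touch the returned value

-- ===== PRECONDITION & SPEC =====
-- Python A raises IndexError on [] (len(mat[0])) and on jagged inputs with a row shorter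
-- than row 0; exactly those inputs are excluded.
def Pre_clean_mat (mat : List (List Int)) : Prop :=
  mat ≠ [] ∧ ∀ row ∈ mat, (mat.headI).length ≤ row.length
instance (mat : List (List Int)) : Decidable (Pre_clean_mat mat) := by
  unfold Pre_clean_mat; infer_instance

def pvWitness_clean_mat : List (List Int) := [[10, 10], [10, 1]]

def Spec_clean_mat (mat : List (List Int)) (out : Bool) : Prop := out = clean_mat_alt mat
instance (mat : List (List Int)) (out : Bool) : Decidable (Spec_clean_mat mat out) := by unfold Spec_clean_mat; infer_instance

-- ===== CLAIM (what is proved, stated in full; the proofs are below) =====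
def Claim_equal_clean_mat : Prop := ∀ (mat : List (List Int)), Dom_clean_mat mat → Pre_clean_mat mat → Spec_clean_mat mat (clean_mat mat)

-- ===== LEMMAS AND PROOFS =====

-- the per-row count of cells > 9 in the ORIGINAL matrix
def pvRowCount (m : List (List Int)) (x : Int) : Nat :=
  (PySem.List.pyRange 0 ((PySem.List.pyGetD m 0 []).length : Int) 1).countP
    (fun y => decide (PySem.List.pyGetD (PySem.List.pyGetD m x []) y 0 > 9))

theorem pv_map_length_set (m : List (List Int)) (n : Nat) (r : List Int)
    (h : r.length = (m.getD n []).length) :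
    (m.set n r).map List.length = m.map List.length := by
  apply List.ext_getElem?
  intro i
  rw [List.map_set]
  by_cases hi : n = i
  · subst hi
    by_cases hn : n < m.length
    · rw [List.getElem?_set_self (by simpa using hn)]
      rw [List.getElem?_eq_getElem (by simpa using hn)]
      simp [h, List.getD, List.getElem?_eq_getElem hn]
    · rw [List.set_eq_of_length_le (by simpa using Nat.le_of_not_lt hn)]
  · rw [List.getElem?_set_ne hi]

theorem pv_row0_len_of_map_len {m1 m : List (List Int)}
    (h : m1.map List.length = m.map List.length) :
    (PySem.List.pyGetD m1 0 []).length = (PySem.List.pyGetD m 0 []).length := by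
  have h0 := congrArg (fun l => l[0]?) h
  simp only [List.getElem?_map] at h0
  simp only [PySem.List.pyGetD_zero, List.getD_eq_getElem?_getD]
  cases e1 : m1[0]? <;> cases e2 : m[0]? <;> simp [e1, e2] at h0 ⊢ <;> simp [h0]

theorem pv_getD_of_nonneg (m : List (List Int)) (x : Int) (hx : 0 ≤ x) :
    PySem.List.pyGetD m x [] = m.getD x.toNat [] := by
  rw [← Int.toNat_of_nonneg hx, PySem.List.pyGetD_natCast]
  simp
  have hmax : (max x 0).toNat = x.toNat := by omega
  rw [hmax]

theorem pv_getD_of_nonneg' (r : List Int) (y : Int) (hy : 0 ≤ y) :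
    PySem.List.pyGetD r y 0 = r.getD y.toNat 0 := by
  rw [← Int.toNat_of_nonneg hy, PySem.List.pyGetD_natCast]
  simp
  have hmax : (max y 0).toNat = y.toNat := by omega
  rw [hmax]

-- inner loop invariant: the y-loop counts the >9 cells of row x (read from the
-- ORIGINAL state), and only row x of the matrix changes (its length preserved)
theorem pv_inner (ys : List Int) (x : Int) (hx : 0 ≤ x) :
    ∀ (f : Int) (m : List (List Int)), ys.Nodup → (∀ y ∈ ys, 0 ≤ y) →
    (ys.foldl (pvStepA x) (f, m)).1
        = f + (ys.countP (fun y => decide (PySem.List.pyGetD (PySem.List.pyGetD m x []) y 0 > 9)) : Int)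
    ∧ (ys.foldl (pvStepA x) (f, m)).2.map List.length = m.map List.length
    ∧ ∀ j : Nat, j ≠ x.toNat → (ys.foldl (pvStepA x) (f, m)).2[j]? = m[j]? := by
  induction ys with
  | nil => intro f m _ _; exact ⟨by simp, rfl, fun _ _ => rfl⟩
  | cons y ys ih =>
    intro f m hnd hnn
    have hy : (0:Int) ≤ y := hnn y (by simp)
    obtain ⟨hyn, hnd'⟩ := List.nodup_cons.mp hnd
    have hnn' : ∀ y' ∈ ys, (0:Int) ≤ y' := fun y' hy' => hnn y' (by simp [hy'])
    simp only [List.foldl_cons]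
    by_cases hgt : PySem.List.pyGetD (PySem.List.pyGetD m x []) y 0 > 9
    · have hstep : pvStepA x (f, m) y
          = (f + 1, PySem.List.pySetD m x (PySem.List.pySetD (PySem.List.pyGetD m x []) y 0)) := by
        simp [pvStepA, hgt]
      rw [hstep]
      have hmset : PySem.List.pySetD m x (PySem.List.pySetD (PySem.List.pyGetD m x []) y 0)
          = m.set x.toNat ((PySem.List.pyGetD m x []).set y.toNat 0) := by
        rw [PySem.List.pySetD_of_nonneg _ _ hx, PySem.List.pySetD_of_nonneg _ _ hy]
      rw [hmset]
      obtain ⟨ih1, ih2, ih3⟩ := ih (f + 1) (m.set x.toNat ((PySem.List.pyGetD m x []).set y.toNat 0)) hnd' hnn'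
      have hlen : (m.set x.toNat ((PySem.List.pyGetD m x []).set y.toNat 0)).map List.length
          = m.map List.length := by
        apply pv_map_length_set
        rw [List.length_set, pv_getD_of_nonneg m x hx]
      have hrow : ∀ y' ∈ ys,
          PySem.List.pyGetD (PySem.List.pyGetD (m.set x.toNat ((PySem.List.pyGetD m x []).set y.toNat 0)) x []) y' 0
            = PySem.List.pyGetD (PySem.List.pyGetD m x []) y' 0 := by
        intro y' hy'
        have hy'0 : (0:Int) ≤ y' := hnn' y' hy'
        have hne : y.toNat ≠ y'.toNat := by
          intro hEq
          exact hyn (by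
            have : y = y' := by omega
            simpa [this] using hy')
        rw [pv_getD_of_nonneg _ x hx, pv_getD_of_nonneg' _ y' hy'0,
            pv_getD_of_nonneg m x hx, pv_getD_of_nonneg' _ y' hy'0]
        by_cases hxr : x.toNat < m.length
        · have hsetget : (m.set x.toNat ((m.getD x.toNat []).set y.toNat 0)).getD x.toNat []
              = (m.getD x.toNat []).set y.toNat 0 := by
            rw [List.getD_eq_getElem?_getD, List.getElem?_set_self (by simpa using hxr)]
            rfl
          rw [hsetget, List.getD_eq_getElem?_getD, List.getD_eq_getElem?_getD,
              List.getElem?_set_ne hne]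
          rw [List.getD_eq_getElem?_getD]
        · rw [List.set_eq_of_length_le (Nat.le_of_not_lt hxr)]
      refine ⟨?_, by rw [ih2, hlen], ?_⟩
      · rw [ih1, List.countP_cons]
        have hcc : ys.countP (fun y' => decide (PySem.List.pyGetD (PySem.List.pyGetD (m.set x.toNat ((PySem.List.pyGetD m x []).set y.toNat 0)) x []) y' 0 > 9))
            = ys.countP (fun y' => decide (PySem.List.pyGetD (PySem.List.pyGetD m x []) y' 0 > 9)) := by
          apply List.countP_congr
          intro y' hy'
          simp [hrow y' hy']
        rw [hcc]
        have hif : (if decide (PySem.List.pyGetD (PySem.List.pyGetD m x []) y 0 > 9) = true then 1 else 0) = 1 := by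
          simp [hgt]
        rw [hif]
        push_cast
        ring
      · intro j hj
        rw [ih3 j hj, List.getElem?_set_ne (fun h => hj h.symm)]
    · have hstep : pvStepA x (f, m) y = (f, m) := by simp [pvStepA, hgt]
      rw [hstep]
      obtain ⟨ih1, ih2, ih3⟩ := ih f m hnd' hnn'
      refine ⟨?_, ih2, ih3⟩
      rw [ih1, List.countP_cons]
      simp [hgt]

-- outer loop invariant: the x-loop accumulates the per-row counts of the ORIGINAL
-- matrix, and all row lengths are preserved
theorem pv_outer (xs : List Int) :
    ∀ (f : Int) (m : List (List Int)), xs.Nodup → (∀ x ∈ xs, 0 ≤ x) →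
    (xs.foldl (fun (st : Int × List (List Int)) x =>
        (PySem.List.pyRange 0 ((PySem.List.pyGetD st.2 0 []).length : Int) 1).foldl (pvStepA x) st)
      (f, m)).1 = f + ((xs.map (pvRowCount m)).sum : Int)
    ∧ (xs.foldl (fun (st : Int × List (List Int)) x =>
        (PySem.List.pyRange 0 ((PySem.List.pyGetD st.2 0 []).length : Int) 1).foldl (pvStepA x) st)
      (f, m)).2.map List.length = m.map List.length := by
  induction xs with
  | nil => intro f m _ _; exact ⟨by simp, rfl⟩
  | cons x xs ih =>
    intro f m hnd hnn
    have hx : (0:Int) ≤ x := hnn x (by simp)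
    obtain ⟨hxn, hnd'⟩ := List.nodup_cons.mp hnd
    have hnn' : ∀ x' ∈ xs, (0:Int) ≤ x' := fun x' hx' => hnn x' (by simp [hx'])
    simp only [List.foldl_cons]
    set ys := PySem.List.pyRange 0 ((PySem.List.pyGetD m 0 []).length : Int) 1 with hys
    obtain ⟨i1, i2, i3⟩ := pv_inner ys x hx f m (PySem.List.nodup_pyRange_one _ _)
      (fun y hy => (PySem.List.mem_pyRange_one.mp hy).1)
    set m1 := ys.foldl (pvStepA x) (f, m) with hm1
    have hpair : m1 = (m1.1, m1.2) := rfl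
    obtain ⟨o1, o2⟩ := ih m1.1 m1.2 hnd' hnn'
    have hrc : ∀ x' ∈ xs, pvRowCount m1.2 x' = pvRowCount m x' := by
      intro x' hx'
      have hx'0 : (0:Int) ≤ x' := hnn' x' hx'
      have hne : x'.toNat ≠ x.toNat := by
        intro hEq
        exact hxn (by
          have : x' = x := by omega
          simpa [this] using hx')
      have hrow : PySem.List.pyGetD m1.2 x' [] = PySem.List.pyGetD m x' [] := by
        rw [pv_getD_of_nonneg _ x' hx'0, pv_getD_of_nonneg m x' hx'0,
            List.getD_eq_getElem?_getD, List.getD_eq_getElem?_getD, i3 x'.toNat hne]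
      unfold pvRowCount
      rw [pv_row0_len_of_map_len i2, hrow]
    constructor
    · rw [hpair, o1, i1]
      have hmap : xs.map (pvRowCount m1.2) = xs.map (pvRowCount m) := List.map_congr_left hrc
      rw [hmap, List.map_cons, List.sum_cons]
      have : (ys.countP (fun y => decide (PySem.List.pyGetD (PySem.List.pyGetD m x []) y 0 > 9)))
          = pvRowCount m x := rfl
      rw [this]
      push_cast
      ring
    · rw [hpair, o2, i2]

theorem pv_sum_eq_mul_iff (L : List Nat) (w : Nat) (h : ∀ c ∈ L, c ≤ w) :
    L.sum = L.length * w ↔ ∀ c ∈ L, c = w := by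
  induction L with
  | nil => simp
  | cons c L ih =>
    have hc : c ≤ w := h c (by simp)
    have hL := ih (fun c' hc' => h c' (by simp [hc']))
    have hb : L.sum ≤ L.length * w := by
      calc L.sum ≤ L.length • w := List.sum_le_card_nsmul L w (fun c' hc' => h c' (by simp [hc']))
        _ = L.length * w := smul_eq_mul _ _
    simp only [List.sum_cons, List.length_cons, List.forall_mem_cons]
    constructor
    · intro he
      have he' : c + L.sum = L.length * w + w := by rw [he]; ring
      have h1 : c = w ∧ L.sum = L.length * w := by omega
      exact ⟨h1.1, hL.mp h1.2⟩
    · rintro ⟨hcw, hall⟩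
      rw [hcw, hL.mpr hall]
      ring

-- ===== VERDICT (by name: the statement is the Claim_ definition above) =====
theorem clean_mat_spec : Claim_equal_clean_mat := by
  intro mat _hdom _hpre
  unfold Spec_clean_mat clean_mat clean_mat_alt
  simp only []
  set xs := PySem.List.pyRange 0 (mat.length : Int) 1 with hxs
  obtain ⟨o1, o2⟩ := pv_outer xs 0 mat (PySem.List.nodup_pyRange_one _ _)
    (fun x hx => (PySem.List.mem_pyRange_one.mp hx).1)
  set res := xs.foldl (fun (st : Int × List (List Int)) x =>
      (PySem.List.pyRange 0 ((PySem.List.pyGetD st.2 0 []).length : Int) 1).foldl (pvStepA x) st)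
    (0, mat) with hres
  have hlen : res.2.length = mat.length := by
    have := congrArg List.length o2
    simpa using this
  have hw : (PySem.List.pyGetD res.2 0 []).length = (PySem.List.pyGetD mat 0 []).length :=
    pv_row0_len_of_map_len o2
  set w := (PySem.List.pyGetD mat 0 []).length with hwdef
  set S := (xs.map (pvRowCount mat)).sum with hS
  have hval : res.1 = (S : Int) := by rw [o1]; ring
  rw [hval, hlen, hw]
  have hxslen : xs.length = mat.length := by
    rw [hxs, PySem.List.length_pyRange_one]; omega
  have hiff : (S : Int) = (mat.length : Int) * (w : Int) ↔ S = mat.length * w := by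
    constructor <;> intro h <;> exact_mod_cast h
  have hle : ∀ c ∈ xs.map (pvRowCount mat), c ≤ w := by
    intro c hc
    obtain ⟨x, _, rfl⟩ := List.mem_map.mp hc
    calc pvRowCount mat x
        ≤ (PySem.List.pyRange 0 ((PySem.List.pyGetD mat 0 []).length : Int) 1).length :=
          List.countP_le_length
      _ = w := by rw [PySem.List.length_pyRange_one]; omega
  have hlenL : (xs.map (pvRowCount mat)).length = mat.length := by
    rw [List.length_map, hxslen]
  have hsum := pv_sum_eq_mul_iff (xs.map (pvRowCount mat)) w hle
  rw [hlenL] at hsum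
  have hrangew : (PySem.List.pyRange 0 ((PySem.List.pyGetD mat 0 []).length : Int) 1).length = w := by
    rw [PySem.List.length_pyRange_one]; omega
  rw [Bool.eq_iff_iff]
  simp only [decide_eq_true_eq, List.all_eq_true]
  rw [hiff, hsum]
  constructor
  · intro hall x hxmem
    have := hall (pvRowCount mat x) (List.mem_map.mpr ⟨x, hxmem, rfl⟩)
    have hcp : (PySem.List.pyRange 0 ((PySem.List.pyGetD mat 0 []).length : Int) 1).countP
        (fun y => decide (PySem.List.pyGetD (PySem.List.pyGetD mat x []) y 0 > 9))
        = (PySem.List.pyRange 0 ((PySem.List.pyGetD mat 0 []).length : Int) 1).length := by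
      rw [hrangew]; exact this
    intro y hymem
    exact of_decide_eq_true (List.countP_eq_length.mp hcp y hymem)
  · intro hall c hcmem
    obtain ⟨x, hxmem, rfl⟩ := List.mem_map.mp hcmem
    unfold pvRowCount
    rw [← hrangew]
    exact List.countP_eq_length.mpr (fun y hy => decide_eq_true (hall x hxmem y hy))
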